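-- pv_equiv track=rewrite | github.com/letiBri/esercizi_ricorsione | quadratoMagico.py | verifica_righe
-- ===== SOURCE A (Python) =====
-- def verifica_righe(parziale, N):
--     lista_somme = []
--     for i in range(N):
--         somma_righe = 0
--         for j in range(i*N, (i+1)*N):
--             somma_righe += parziale[j]
--         lista_somme.append(somma_righe)
--     for i in range(1, len(lista_somme)):
--         if lista_somme[i] != lista_somme[i-1]:
--             return False
--     return True
-- ===== SOURCE B (Python) =====
-- def verifica_righe(parziale, N):
--     if N <= 0:
--         return True
--     target = sum(parziale[:N])
--
--     def check(rest, righe):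
--         if righe == 0:
--             return True
--         return sum(rest[:N]) == target and check(rest[N:], righe - 1)
--
--     return check(parziale[N:], N - 1)
-- ===== Notes on version B (the rewrite author's own statement) =====
-- stated objective: alternative
-- what changed: Instead of materialising the list of all N row sums and scanning adjacent pairs, B precomputes the first row's sum as a target and recursively walks the remaining flat list, peeling one row per call and comparing it to the target with short-circuit, building no intermediate list.
import Mathlib
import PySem

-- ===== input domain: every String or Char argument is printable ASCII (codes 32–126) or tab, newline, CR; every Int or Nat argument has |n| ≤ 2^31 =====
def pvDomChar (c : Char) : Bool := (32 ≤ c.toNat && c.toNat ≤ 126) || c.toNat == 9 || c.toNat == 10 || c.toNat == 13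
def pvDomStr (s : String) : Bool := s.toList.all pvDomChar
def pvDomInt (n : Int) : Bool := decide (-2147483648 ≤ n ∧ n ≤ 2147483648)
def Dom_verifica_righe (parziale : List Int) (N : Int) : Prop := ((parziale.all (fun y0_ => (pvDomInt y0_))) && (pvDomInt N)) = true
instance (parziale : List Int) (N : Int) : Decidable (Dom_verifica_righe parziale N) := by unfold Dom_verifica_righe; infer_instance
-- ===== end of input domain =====

-- B replaces A's build-row-sum-list-then-pairwise-adjacent-scan with a recursion over
-- the remaining flat list that peels one row per call and compares its sum to the
-- precomputed first-row target, building no intermediate list (objective: alternative).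

-- ===== PORT A =====
def verifica_righe (parziale : List Int) (N : Int) : Bool :=
  let lista_somme : List Int :=
    (PySem.List.pyRange 0 N 1).foldl (fun acc i =>
      acc ++ [(PySem.List.pyRange (i * N) ((i + 1) * N) 1).foldl
        (fun somma_righe j => somma_righe + PySem.List.pyGetD parziale j 0) 0]) []
  (PySem.List.pyRange 1 (lista_somme.length : Int) 1).foldl
    (fun r i => r && (PySem.List.pyGetD lista_somme i 0 == PySem.List.pyGetD lista_somme (i - 1) 0)) true

-- ===== PORT B =====
-- Python's inner 'check' tests 'righe == 0'; the '≤' here is only a totality guard —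
-- B calls it with righe = N - 1 ≥ 0, where '== 0' and '≤ 0' agree.
def checkRows (N target : Int) (rest : List Int) (righe : Int) : Bool :=
  if h : righe ≤ 0 then true
  else
    ((PySem.List.slice rest none (some N)).sum == target) &&
      checkRows N target (PySem.List.slice rest (some N) none) (righe - 1)
termination_by righe.toNat
decreasing_by omega

def verifica_righe_alt (parziale : List Int) (N : Int) : Bool :=
  if N ≤ 0 then true
  else
    let target := (PySem.List.slice parziale none (some N)).sum
    checkRows N target (PySem.List.slice parziale (some N) none) (N - 1)

-- ===== PRECONDITION & SPEC =====
-- Pre_ excludes exactly the inputs on which A raises IndexError: 0 < N with fewer than N*N elements.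
def Pre_verifica_righe (parziale : List Int) (N : Int) : Prop :=
  0 < N → N * N ≤ (parziale.length : Int)
instance (parziale : List Int) (N : Int) : Decidable (Pre_verifica_righe parziale N) := by
  unfold Pre_verifica_righe; infer_instance
def pvWitness_verifica_righe : List Int × Int := ([1, 2, 2, 1], 2)

def Spec_verifica_righe (parziale : List Int) (N : Int) (out : Bool) : Prop :=
  out = verifica_righe_alt parziale N
instance (parziale : List Int) (N : Int) (out : Bool) : Decidable (Spec_verifica_righe parziale N out) := by
  unfold Spec_verifica_righe; infer_instance

-- ===== CLAIM (what is proved, stated in full; the proofs are below) =====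
def Claim_equal_verifica_righe : Prop := ∀ (parziale : List Int) (N : Int), Dom_verifica_righe parziale N → Pre_verifica_righe parziale N → Spec_verifica_righe parziale N (verifica_righe parziale N)

-- ===== LEMMAS AND PROOFS =====

lemma map_pyGetD_eq_slice (xs : List Int) (a b : Int) (ha : 0 ≤ a) (hab : a ≤ b)
    (hb : b ≤ (xs.length : Int)) :
    (PySem.List.pyRange a b 1).map (fun j => PySem.List.pyGetD xs j 0)
      = PySem.List.slice xs (some a) (some b) := by
  have h0b : 0 ≤ b := le_trans ha hab
  rw [PySem.List.slice_toNat xs ha h0b]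
  induction hk : (b - a).toNat generalizing a with
  | zero =>
    rw [PySem.List.pyRange_one_eq_nil (by omega)]
    simp; omega
  | succ n ih =>
    rw [PySem.List.pyRange_one_cons (by omega)]
    have hlt : a.toNat < xs.length := by omega
    rw [List.drop_eq_getElem_cons hlt]
    have hbn : b.toNat - a.toNat = n + 1 := by omega
    rw [hbn, List.take_succ_cons, List.map_cons]
    have htail := ih (a + 1) (by omega) (by omega) (by omega)
    have h1 : (a + 1).toNat = a.toNat + 1 := by omega
    have h2 : b.toNat - (a.toNat + 1) = n := by omega
    rw [h1, h2] at htail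
    rw [htail, PySem.List.pyGetD_eq_getElem (xs := xs) (d := 0) ha (by omega)]

lemma adjacent_iff_all_eq (L : List Int) :
    ((PySem.List.pyRange 1 (L.length : Int) 1).all
      (fun i => PySem.List.pyGetD L i 0 == PySem.List.pyGetD L (i - 1) 0)) = true
      ↔ (∀ x ∈ L, ∀ y ∈ L, x = y) := by
  simp only [List.all_eq_true, PySem.List.mem_pyRange_one, beq_iff_eq]
  constructor
  · intro h x hx y hy
    have chain : ∀ k : Nat, k + 1 < L.length → L.getD (k + 1) 0 = L.getD k 0 := by
      intro k hk
      have hgi := h ((k : Int) + 1) ⟨by omega, by omega⟩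
      rw [PySem.List.pyGetD_eq_getElem L 0 (by omega) (by omega),
          PySem.List.pyGetD_eq_getElem L 0 (by omega) (by omega)] at hgi
      simp only [show ((k : Int) + 1).toNat = k + 1 from by omega,
                 show ((k : Int) + 1 - 1).toNat = k from by omega] at hgi
      rw [List.getD_eq_getElem L 0 hk, List.getD_eq_getElem L 0 (by omega)]
      exact hgi
    have head : ∀ k : Nat, k < L.length → L.getD k 0 = L.getD 0 0 := by
      intro k
      induction k with
      | zero => intro _; rfl
      | succ n ih => intro hk; rw [chain n hk, ih (by omega)]
    obtain ⟨ix, hix, rfl⟩ := List.mem_iff_getElem.mp hx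
    obtain ⟨iy, hiy, rfl⟩ := List.mem_iff_getElem.mp hy
    rw [← List.getD_eq_getElem L 0 hix, ← List.getD_eq_getElem L 0 hiy,
        head ix hix, head iy hiy]
  · intro h i hi
    obtain ⟨h1, h2⟩ := hi
    rw [PySem.List.pyGetD_eq_getElem L 0 (by omega) h2,
        PySem.List.pyGetD_eq_getElem L 0 (by omega) (by omega)]
    exact h _ (L.getElem_mem _) _ (L.getElem_mem _)

-- foldl with && is 'init && all'
lemma foldl_and_eq_all {α : Type} (l : List α) (p : α → Bool) (b : Bool) :
    l.foldl (fun r x => r && p x) b = (b && l.all p) := by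
  induction l generalizing b with
  | nil => simp
  | cons x xs ih => simp [List.foldl_cons, ih, Bool.and_assoc]

-- all pairwise equal on a mapped range ↔ all values equal f 0
lemma pairwise_map_range_iff (f : Nat → Int) (n : Nat) :
    (∀ x ∈ (List.range n).map f, ∀ y ∈ (List.range n).map f, x = y)
      ↔ ∀ i < n, f i = f 0 := by
  constructor
  · intro h i hi
    exact h (f i) (by simp; exact ⟨i, hi, rfl⟩) (f 0) (by simp; exact ⟨0, by omega, rfl⟩)
  · intro h x hx y hy
    simp only [List.mem_map, List.mem_range] at hx hy
    obtain ⟨i, hi, rfl⟩ := hx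
    obtain ⟨j, hj, rfl⟩ := hy
    rw [h i hi, h j hj]

-- characterisation of B's recursion: k rows checked against the target
lemma checkRows_eq (N target : Int) (hN : 0 < N) (k : Nat) (xs : List Int) :
    checkRows N target xs (k : Int)
      = (List.range k).all
          (fun i => ((xs.drop (i * N.toNat)).take N.toNat).sum == target) := by
  induction k generalizing xs with
  | zero => rw [checkRows]; simp
  | succ n ih =>
    rw [checkRows]
    have hk : ¬ ((n + 1 : Nat) : Int) ≤ 0 := by omega
    rw [dif_neg hk]
    have h1 : ((n + 1 : Nat) : Int) - 1 = (n : Int) := by omega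
    rw [PySem.List.slice_to _ (le_of_lt hN), PySem.List.slice_from _ (le_of_lt hN), h1,
        ih (xs.drop N.toNat)]
    have hfun : (fun i : Nat => ((((xs.drop N.toNat).drop (i * N.toNat)).take N.toNat).sum == target))
        = (fun i : Nat => (((xs.drop ((i + 1) * N.toNat)).take N.toNat).sum == target)) := by
      funext i
      rw [List.drop_drop, show N.toNat + i * N.toNat = (i + 1) * N.toNat from by ring]
    rw [hfun, List.range_succ_eq_map]
    simp only [List.all_cons, List.all_map, Function.comp_def, Nat.zero_mul, List.drop_zero]

-- ===== VERDICT (by name: the statement is the Claim_ definition above) =====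
theorem verifica_righe_spec : Claim_equal_verifica_righe := by
  intro p N hdom hpre
  unfold Spec_verifica_righe verifica_righe verifica_righe_alt
  rw [PySem.List.foldl_append_singleton_eq_map, List.nil_append]
  by_cases hN : N ≤ 0
  · rw [if_pos hN, PySem.List.pyRange_one_eq_nil hN]
    simp
  · rw [if_neg hN]
    have hN' : 0 < N := by omega
    have hlen : N * N ≤ (p.length : Int) := hpre hN'
    set Nt := N.toNat with hNt
    have hNcast : N = (Nt : Int) := by omega
    clear hN
    -- A's list of row sums as a map over List.range
    have hmap : (PySem.List.pyRange 0 N 1).map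
          (fun i => (PySem.List.pyRange (i * N) ((i + 1) * N) 1).foldl
            (fun somma_righe j => somma_righe + PySem.List.pyGetD p j 0) 0)
        = (List.range Nt).map (fun k => ((p.drop (k * Nt)).take Nt).sum) := by
      rw [PySem.List.pyRange_one, List.map_map]
      have : ((N : Int) - 0).toNat = Nt := by omega
      rw [this]
      apply List.map_congr_left
      intro k hk
      simp only [List.mem_range] at hk
      have hk' : (k : Int) < N := by omega
      have hub : ((k : Int) + 1) * N ≤ (p.length : Int) := by nlinarith
      simp only [Function.comp]
      rw [PySem.List.foldl_add, zero_add,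
          map_pyGetD_eq_slice p ((0 + (k : Int)) * N) ((0 + (k : Int) + 1) * N)
            (by positivity) (by nlinarith) (by simpa using hub)]
      have e1 : (0 + (k : Int)) * N = ((k * Nt : Nat) : Int) := by
        push_cast; rw [hNcast]; ring
      have e2 : (0 + (k : Int) + 1) * N = (((k + 1) * Nt : Nat) : Int) := by
        push_cast; rw [hNcast]; ring
      rw [e1, e2, PySem.List.slice_natCast]
      congr 2
      rw [Nat.add_mul, one_mul, Nat.add_sub_cancel_left]
    rw [hmap]
    -- B's recursion characterised
    have hB : checkRows N ((PySem.List.slice p none (some N)).sum)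
          (PySem.List.slice p (some N) none) (N - 1)
        = (List.range (Nt - 1)).all
            (fun i => (((p.drop Nt).drop (i * Nt)).take Nt).sum == (p.take Nt).sum) := by
      have hN1 : N - 1 = ((Nt - 1 : Nat) : Int) := by omega
      rw [hN1, PySem.List.slice_to _ (by omega), PySem.List.slice_from _ (by omega),
          checkRows_eq N _ hN' (Nt - 1) (p.drop Nt)]
    rw [hB, Bool.eq_iff_iff, foldl_and_eq_all, Bool.true_and,
        adjacent_iff_all_eq, pairwise_map_range_iff]
    simp only [List.all_eq_true, List.mem_range, beq_iff_eq, List.drop_drop]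
    constructor
    · intro h i hi
      have := h (i + 1) (by omega)
      simpa [Nat.add_comm, Nat.add_mul, List.take_zero] using this
    · intro h i hi
      cases i with
      | zero => rfl
      | succ j =>
        have := h j (by omega)
        simp only [Nat.zero_mul, List.drop_zero] at *
        rw [show Nt + j * Nt = (j + 1) * Nt by ring] at this
        exact this
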